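-- pv_equiv track=rewrite | github.com/middledoor0421/bird_sahi_temporal | scripts2/eval_video_kpi2.py | sustained_lock
-- ===== SOURCE A (Python) =====
-- from typing import Any, Dict, List, Optional, Tuple
--
-- def sustained_lock(hit_seq: List[int], n: int) -> bool:
--     if n <= 0:
--         return True
--     cur = 0
--     for v in hit_seq:
--         if v == 1:
--             cur += 1
--             if cur >= n:
--                 return True
--         else:
--             cur = 0
--     return False
-- ===== SOURCE B (Python) =====
-- def sustained_lock(hit_seq, n):
--     if n <= 0:
--         return True
--     i, m = 0, len(hit_seq)
--     while i < m:
--         j = i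
--         while j < m and hit_seq[j] == hit_seq[i]:
--             j += 1
--         if hit_seq[i] == 1 and j - i >= n:
--             return True
--         i = j
--     return False
-- ===== Notes on version B (the rewrite author's own statement) =====
-- stated objective: alternative
-- what changed: B decomposes the sequence into maximal runs of equal values and checks whether any run of 1s has length >= n, instead of threading a running counter with inline reset.
import Mathlib
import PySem

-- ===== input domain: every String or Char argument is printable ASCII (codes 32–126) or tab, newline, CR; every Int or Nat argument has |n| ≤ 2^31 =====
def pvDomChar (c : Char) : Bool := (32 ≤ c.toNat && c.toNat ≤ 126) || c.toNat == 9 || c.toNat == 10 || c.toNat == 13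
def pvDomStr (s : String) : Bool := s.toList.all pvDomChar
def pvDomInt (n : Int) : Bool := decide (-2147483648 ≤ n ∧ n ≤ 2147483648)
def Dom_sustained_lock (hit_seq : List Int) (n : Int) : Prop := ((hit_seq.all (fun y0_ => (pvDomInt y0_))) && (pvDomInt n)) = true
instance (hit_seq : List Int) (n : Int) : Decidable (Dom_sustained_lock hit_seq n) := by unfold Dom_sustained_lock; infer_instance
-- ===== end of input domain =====

-- B scans the sequence as maximal runs of equal values and tests each run of 1s for length ≥ n,
-- instead of A's running counter with inline reset; alternative decomposition, same cost.

-- ===== PORT A =====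
-- the for-loop of A with its counter state `cur`
def pvGoA (n : Int) : List Int → Int → Bool
  | [], _ => false
  | v :: rest, cur =>
    if v == 1 then
      if cur + 1 ≥ n then true else pvGoA n rest (cur + 1)
    else pvGoA n rest 0

def sustained_lock (hit_seq : List Int) (n : Int) : Bool :=
  if n ≤ 0 then true else pvGoA n hit_seq 0

-- ===== PORT B =====
-- B's outer while-loop: each step extracts the maximal run starting at the cursor (inner while)
def pvRuns : List Int → List (Int × Int)
  | [] => []
  | v :: rest =>
    (v, (rest.takeWhile (· == v)).length + 1) :: pvRuns (rest.dropWhile (· == v))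
termination_by l => l.length
decreasing_by
  simpa using Nat.lt_succ_of_le (List.length_dropWhile_le _ _)

def sustained_lock_alt (hit_seq : List Int) (n : Int) : Bool :=
  if n ≤ 0 then true
  else (pvRuns hit_seq).any (fun p => p.1 == 1 && decide (p.2 ≥ n))

-- ===== PRECONDITION & SPEC =====
def Spec_sustained_lock (hit_seq : List Int) (n : Int) (out : Bool) : Prop := out = sustained_lock_alt hit_seq n
instance (hit_seq : List Int) (n : Int) (out : Bool) : Decidable (Spec_sustained_lock hit_seq n out) := by unfold Spec_sustained_lock; infer_instance

-- ===== CLAIM (what is proved, stated in full; the proofs are below) =====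
def Claim_equal_sustained_lock : Prop := ∀ (hit_seq : List Int) (n : Int), Dom_sustained_lock hit_seq n → Spec_sustained_lock hit_seq n (sustained_lock hit_seq n)

-- ===== LEMMAS AND PROOFS =====

-- the run-check of B as a function of the list
def pvAnyB (n : Int) (l : List Int) : Bool :=
  (pvRuns l).any (fun p => p.1 == 1 && decide (p.2 ≥ n))

-- dropping a (possibly empty) leading run of a non-1 value does not change B's answer
lemma pvAnyB_dropWhile (n v : Int) (hv : v ≠ 1) (l : List Int) :
    pvAnyB n (l.dropWhile (· == v)) = pvAnyB n l := by
  cases l with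
  | nil => rfl
  | cons w t =>
    by_cases hw : w = v
    · subst hw
      simp [List.dropWhile, pvAnyB, pvRuns, hv]
    · have hwv : (w == v) = false := by simp [hw]
      simp [List.dropWhile, hwv]

lemma pvAnyB_cons_ne (n v : Int) (hv : v ≠ 1) (rest : List Int) :
    pvAnyB n (v :: rest) = pvAnyB n rest := by
  rw [← pvAnyB_dropWhile n v hv rest]
  simp [pvAnyB, pvRuns, hv]

-- B's answer satisfies the "leading run of 1s, then the remainder" recurrence
lemma pvAnyB_step (n : Int) (hn : 0 < n) (l : List Int) :
    pvAnyB n l =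
      (decide (((l.takeWhile (· == (1 : Int))).length : Int) ≥ n)
        || pvAnyB n (l.dropWhile (· == (1 : Int)))) := by
  cases l with
  | nil =>
    simp [pvAnyB, pvRuns]
    omega
  | cons v rest =>
    by_cases hv : v = 1
    · subst hv
      simp [pvAnyB, pvRuns, List.takeWhile, List.dropWhile]
    · have hv' : (v == (1 : Int)) = false := by simp [hv]
      have h1 : (v :: rest).takeWhile (· == (1 : Int)) = [] := by
        simp [List.takeWhile, hv']
      have h2 : (v :: rest).dropWhile (· == (1 : Int)) = v :: rest := by
        simp [List.dropWhile, hv']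
      rw [h1, h2]
      simp
      omega

-- A's loop computes the same recurrence, carrying the current count of the partial run
lemma pvGoA_eq (n : Int) (l : List Int) :
    ∀ cur : Int, 0 ≤ cur → cur < n →
      pvGoA n l cur =
        (decide (cur + ((l.takeWhile (· == (1 : Int))).length : Int) ≥ n)
          || pvAnyB n (l.dropWhile (· == (1 : Int)))) := by
  induction l with
  | nil =>
    intro cur _ hlt
    simp [pvGoA, pvAnyB, pvRuns]
    omega
  | cons v rest ih =>
    intro cur hge hlt
    by_cases hv : v = 1
    · subst hv
      have htake : (1 :: rest).takeWhile (· == (1 : Int))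
          = 1 :: rest.takeWhile (· == (1 : Int)) := by
        simp [List.takeWhile]
      have hdrop : (1 :: rest).dropWhile (· == (1 : Int)) = rest.dropWhile (· == (1 : Int)) := by
        simp [List.dropWhile]
      rw [htake, hdrop]
      by_cases hc : cur + 1 ≥ n
      · simp [pvGoA, hc]
        left
        have : (0 : Int) ≤ ((rest.takeWhile (· == (1 : Int))).length : Int) := by positivity
        omega
      · have hih := ih (cur + 1) (by omega) (by omega)
        simp only [pvGoA, if_pos (by simp : ((1 : Int) == 1) = true), if_neg hc, hih]
        congr 1
        have : (cur + 1 + ((rest.takeWhile (· == (1 : Int))).length : Int) ≥ n)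
            ↔ (cur + (((1 :: rest.takeWhile (· == (1 : Int))).length : Nat) : Int) ≥ n) := by
          simp only [List.length_cons]
          push_cast
          omega
        simp only [this]
    · have hn : 0 < n := by omega
      have hv' : (v == (1 : Int)) = false := by simp [hv]
      have h1 : (v :: rest).takeWhile (· == (1 : Int)) = [] := by
        simp [List.takeWhile, hv']
      have h2 : (v :: rest).dropWhile (· == (1 : Int)) = v :: rest := by
        simp [List.dropWhile, hv']
      have hstep := pvAnyB_step n hn rest
      have hgo : pvGoA n (v :: rest) cur = pvGoA n rest 0 := by
        simp [pvGoA, hv']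
      rw [hgo, ih 0 le_rfl hn, h1, h2]
      rw [zero_add] at *
      rw [← hstep, pvAnyB_cons_ne n v hv rest]
      simp
      omega

-- ===== VERDICT (by name: the statement is the Claim_ definition above) =====
theorem sustained_lock_spec : Claim_equal_sustained_lock := by
  intro hit_seq n _
  unfold Spec_sustained_lock sustained_lock sustained_lock_alt
  by_cases hn : n ≤ 0
  · simp [hn]
  · have hn' : 0 < n := by omega
    rw [if_neg hn, if_neg hn]
    have h := pvGoA_eq n hit_seq 0 le_rfl hn'
    rw [zero_add] at h
    rw [h, ← pvAnyB_step n hn' hit_seq]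
    rfl
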